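-- pv_equiv track=rewrite | github.com/rux-xy/velaris-data-parity-engine | src/core/id_detector.py | candidate_id_column
-- ===== SOURCE A (Python) =====
-- ID_TOKENS = [
--     "id", "external id", "externalid", "external_id", "safeid", "msafe", "opportunity", "booking", "subscription",
--     "account 18", "account id", "salesforce", "salesforce id", "18 digit"
-- ]
--
-- def candidate_id_column(df_columns):
--     # df_columns: iterable of column names (strings)
--     cols = list(df_columns)
--     favorites = ["MsafeID__c", "External ID", "external id", "external_id", "id", "Id", "Opportunity 18 digit ID"]
--     for h in cols:
--         if h in favorites:
--             return h
--     for token in ID_TOKENS: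
--         for h in cols:
--             if token in h.lower():
--                 return h
--     return cols[0] if cols else None
-- ===== SOURCE B (Python) =====
-- ID_TOKENS = [
--     "id", "external id", "externalid", "external_id", "safeid", "msafe", "opportunity", "booking", "subscription",
--     "account 18", "account id", "salesforce", "salesforce id", "18 digit"
-- ]
--
-- FAVORITES = {"MsafeID__c", "External ID", "external id", "external_id", "id", "Id", "Opportunity 18 digit ID"}
--
--
-- def candidate_id_column(df_columns):
--     # Single pass over the columns: return the first favorite immediately;
--     # otherwise keep the column with the smallest (earliest) matching token index.
--     cols = list(df_columns)
--     best = None  # (token_index, column), earliest occurrence kept on ties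
--     for h in cols:
--         if h in FAVORITES:
--             return h
--         hl = h.lower()
--         i = next((i for i, t in enumerate(ID_TOKENS) if t in hl), None)
--         if i is not None and (best is None or i < best[0]):
--             best = (i, h)
--     if best is not None:
--         return best[1]
--     return cols[0] if cols else None
-- ===== Notes on version B (the rewrite author's own statement) =====
-- stated objective: alternative
-- what changed: Replaces A's two prioritized scans (a favorites pass, then a token-outer nested rescan of the columns per ID token) by a single pass over the columns that returns the first favorite immediately and otherwise keeps an argmin over each column's earliest-matching-token index.
import Mathlib
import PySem

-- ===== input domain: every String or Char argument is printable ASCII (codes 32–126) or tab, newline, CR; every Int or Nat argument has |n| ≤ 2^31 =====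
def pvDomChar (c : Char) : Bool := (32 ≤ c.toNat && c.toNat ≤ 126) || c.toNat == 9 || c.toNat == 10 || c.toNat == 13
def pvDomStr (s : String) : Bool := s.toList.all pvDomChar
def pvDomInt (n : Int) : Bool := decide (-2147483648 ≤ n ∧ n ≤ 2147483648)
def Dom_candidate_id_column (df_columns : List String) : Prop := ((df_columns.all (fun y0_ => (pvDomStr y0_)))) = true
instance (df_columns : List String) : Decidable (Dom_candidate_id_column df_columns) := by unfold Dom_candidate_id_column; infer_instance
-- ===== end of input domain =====

-- B replaces A's two prioritized scans (favorites pass, then per-token column rescans) by a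
-- single pass over the columns keeping an argmin over each column's earliest matching token index.


def pvIdTokens : List String :=
  ["id", "external id", "externalid", "external_id", "safeid", "msafe", "opportunity", "booking", "subscription",
   "account 18", "account id", "salesforce", "salesforce id", "18 digit"]

-- ===== PORT A =====
def pvFavorites : List String :=
  ["MsafeID__c", "External ID", "external id", "external_id", "id", "Id", "Opportunity 18 digit ID"]

-- the nested 'for token in ID_TOKENS: for h in cols: if token in h.lower(): return h' loops
def pvTokenScan : List String → List String → Option String
  | [], _ => none
  | t :: ts, cols =>
    match cols.find? (fun h => PySem.Str.isIn t (PySem.Str.lower h)) with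
    | some h => some h
    | none => pvTokenScan ts cols

def candidate_id_column (df_columns : List String) : Option String :=
  match df_columns.find? (fun h => pvFavorites.contains h) with
  | some h => some h
  | none =>
    match pvTokenScan pvIdTokens df_columns with
    | some h => some h
    | none => df_columns.head?   -- cols[0] if cols else None

-- ===== PORT B =====
def pvFavSet : PySem.Set String :=
  PySem.Set.ofList ["MsafeID__c", "External ID", "external id", "external_id", "id", "Id", "Opportunity 18 digit ID"]

-- next((i for i, t in enumerate(ID_TOKENS) if t in hl), None)
def pvFirstIdx (q : String → Bool) : List String → Option Nat
  | [] => none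
  | t :: ts => if q t then some 0 else (pvFirstIdx q ts).map (· + 1)

-- 'if i is not None and (best is None or i < best[0]): best = (i, h)'
def pvUpd (best : Option (Nat × String)) (h : String) : Option (Nat × String) :=
  match pvFirstIdx (fun t => PySem.Str.isIn t (PySem.Str.lower h)) pvIdTokens with
  | none => best
  | some i =>
    match best with
    | none => some (i, h)
    | some (j, _) => if i < j then some (i, h) else best

-- the single 'for h in cols' loop with its early return on a favorite
def pvBLoop : List String → Option (Nat × String) → Option String
  | [], best => best.map Prod.snd
  | h :: rest, best =>
    if PySem.Set.contains pvFavSet h then some h else pvBLoop rest (pvUpd best h)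

def candidate_id_column_alt (df_columns : List String) : Option String :=
  match pvBLoop df_columns none with
  | some h => some h
  | none => df_columns.head?

-- ===== PRECONDITION & SPEC =====
def Spec_candidate_id_column (df_columns : List String) (out : Option String) : Prop := out = candidate_id_column_alt df_columns
instance (df_columns : List String) (out : Option String) : Decidable (Spec_candidate_id_column df_columns out) := by unfold Spec_candidate_id_column; infer_instance

-- ===== CLAIM (what is proved, stated in full; the proofs are below) =====
def Claim_equal_candidate_id_column : Prop := ∀ (df_columns : List String), Dom_candidate_id_column df_columns → Spec_candidate_id_column df_columns (candidate_id_column df_columns)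

-- ===== LEMMAS AND PROOFS =====

theorem pvFirstIdx_cons (q : String → Bool) (t : String) (ts : List String) :
    pvFirstIdx q (t :: ts) = if q t then some 0 else (pvFirstIdx q ts).map (· + 1) := rfl

-- generic argmin step, abstracting pvUpd over the key function
def gUpd (f : String → Option Nat) (best : Option (Nat × String)) (h : String) : Option (Nat × String) :=
  match f h with
  | none => best
  | some i =>
    match best with
    | none => some (i, h)
    | some (j, _) => if i < j then some (i, h) else best

theorem pvUpd_eq_gUpd :
    pvUpd = gUpd (fun h => pvFirstIdx (fun t => PySem.Str.isIn t (PySem.Str.lower h)) pvIdTokens) := rfl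

theorem favSet_contains (h : String) :
    PySem.Set.contains pvFavSet h = pvFavorites.contains h := rfl

-- once the accumulator holds key 0, nothing replaces it
theorem foldl_gUpd_zero_fixed (f : String → Option Nat) (g : String) :
    ∀ cols : List String, cols.foldl (gUpd f) (some (0, g)) = some (0, g) := by
  intro cols
  induction cols with
  | nil => rfl
  | cons h r ih =>
    simp only [List.foldl_cons]
    have : gUpd f (some (0, g)) h = some (0, g) := by
      unfold gUpd; cases f h with
      | none => rfl
      | some i => simp
    rw [this, ih]

-- if the keys all fail, the fold from none yields none
theorem foldl_gUpd_none (f : String → Option Nat) :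
    ∀ cols : List String, (∀ h ∈ cols, f h = none) → cols.foldl (gUpd f) none = none := by
  intro cols hall
  induction cols with
  | nil => rfl
  | cons h r ih =>
    simp only [List.foldl_cons]
    have h0 : f h = none := hall h (by simp)
    have : gUpd f none h = none := by unfold gUpd; rw [h0]
    rw [this]
    exact ih (fun x hx => hall x (by simp [hx]))

-- shifting every key by +1 commutes with the fold
theorem foldl_gUpd_shift (f f' : String → Option Nat) :
    ∀ (cols : List String) (b : Option (Nat × String)),
      (∀ h ∈ cols, f' h = (f h).map (· + 1)) →
      cols.foldl (gUpd f') (b.map (fun p => (p.1 + 1, p.2))) =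
        (cols.foldl (gUpd f) b).map (fun p => (p.1 + 1, p.2)) := by
  intro cols
  induction cols with
  | nil => intro b _; rfl
  | cons h r ih =>
    intro b hall
    simp only [List.foldl_cons]
    have hstep : gUpd f' (b.map (fun p => (p.1 + 1, p.2))) h =
        (gUpd f b h).map (fun p => (p.1 + 1, p.2)) := by
      have hh : f' h = (f h).map (· + 1) := hall h (by simp)
      unfold gUpd
      rw [hh]
      cases f h with
      | none => rfl
      | some i =>
        cases b with
        | none => rfl
        | some p =>
          obtain ⟨j, g⟩ := p
          by_cases hij : i < j
          · simp [hij]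
          · simp [hij]
    rw [hstep]
    exact ih (gUpd f b h) (fun x hx => hall x (by simp [hx]))

-- if the first column with key 0 is h₀ and the accumulator's key is positive, the fold yields (0, h₀)
theorem foldl_gUpd_first_zero (f : String → Option Nat) :
    ∀ (cols : List String) (b : Option (Nat × String)) (h₀ : String),
      (∀ j g, b = some (j, g) → 0 < j) →
      cols.find? (fun h => f h == some 0) = some h₀ →
      cols.foldl (gUpd f) b = some (0, h₀) := by
  intro cols
  induction cols with
  | nil => intro b h₀ _ hfind; simp at hfind
  | cons h r ih =>
    intro b h₀ hb hfind
    simp only [List.foldl_cons]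
    by_cases hz : f h = some 0
    · have hfh : (f h == some 0) = true := by simp [hz]
      rw [List.find?_cons, hfh] at hfind
      injection hfind with hh; subst hh
      have : gUpd f b h = some (0, h) := by
        unfold gUpd; rw [hz]
        cases b with
        | none => rfl
        | some p =>
          obtain ⟨j, g⟩ := p
          have := hb j g rfl
          simp [this]
      rw [this]
      exact foldl_gUpd_zero_fixed f h r
    · have hfh : (f h == some 0) = false := by simp [hz]
      rw [List.find?_cons, hfh] at hfind
      refine ih (gUpd f b h) h₀ ?_ hfind
      intro j g hjg
      unfold gUpd at hjg
      cases hfhv : f h with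
      | none => rw [hfhv] at hjg; exact hb j g hjg
      | some i =>
        have hi : 0 < i := by
          rcases Nat.eq_zero_or_pos i with h0 | h0
          · exact absurd (by rw [hfhv, h0]) hz
          · exact h0
        rw [hfhv] at hjg
        cases b with
        | none =>
          injection hjg with hjg'
          injection hjg' with h1 h2
          exact h1 ▸ hi
        | some p =>
          obtain ⟨j', g'⟩ := p
          by_cases hij : i < j'
          · simp only [hij, if_true] at hjg
            cases hjg; exact hi
          · simp only [hij, if_false] at hjg
            exact hb j g hjg

-- the crux: A's token-outer nested scan equals B's per-column argmin over first token indices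
theorem tokenScan_eq_argmin (q : String → String → Bool) :
    ∀ (ts cols : List String),
      (List.findSome? (fun t => cols.find? (fun h => q t h)) ts) =
        (cols.foldl (gUpd (fun h => pvFirstIdx (fun t => q t h) ts)) none).map Prod.snd := by
  intro ts
  induction ts with
  | nil =>
    intro cols
    rw [foldl_gUpd_none (fun h => pvFirstIdx (fun t => q t h) []) cols (fun h _ => rfl)]
    rfl
  | cons t ts ih =>
    intro cols
    rw [List.findSome?_cons]
    cases hfind : cols.find? (fun h => q t h) with
    | some h₀ =>
      have hfind' : cols.find? (fun h => (pvFirstIdx (fun t' => q t' h) (t :: ts)) == some 0) = some h₀ := by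
        have : (fun h => (pvFirstIdx (fun t' => q t' h) (t :: ts)) == some 0) = (fun h => q t h) := by
          funext h
          rw [pvFirstIdx_cons]
          by_cases hq : q t h
          · simp [hq]
          · simp only [hq]
            cases pvFirstIdx (fun t' => q t' h) ts with
            | none => simp
            | some k => simp
        rw [this]; exact hfind
      rw [foldl_gUpd_first_zero _ cols none h₀ (by intro j g hjg; cases hjg) hfind']
      simp
    | none =>
      have hnone : ∀ h ∈ cols, ¬ (q t h = true) := by
        intro h hh
        exact fun hq => by
          have := List.find?_eq_none.mp hfind h hh
          exact this hq
      have hshift : ∀ h ∈ cols,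
          (fun h => pvFirstIdx (fun t' => q t' h) (t :: ts)) h =
            ((fun h => pvFirstIdx (fun t' => q t' h) ts) h).map (· + 1) := by
        intro h hh
        show pvFirstIdx (fun t' => q t' h) (t :: ts) =
          Option.map (· + 1) (pvFirstIdx (fun t' => q t' h) ts)
        rw [pvFirstIdx_cons]
        have : q t h = false := by
          cases hq : q t h
          · rfl
          · exact absurd hq (hnone h hh)
        rw [this, if_neg (by simp)]
      have := foldl_gUpd_shift (fun h => pvFirstIdx (fun t' => q t' h) ts)
        (fun h => pvFirstIdx (fun t' => q t' h) (t :: ts)) cols none hshift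
      simp only [Option.map_none] at this
      rw [this, ih cols, Option.map_map]
      rfl

-- pvTokenScan is findSome? of the inner find?
theorem tokenScan_eq_findSome : ∀ (ts cols : List String),
    pvTokenScan ts cols =
      List.findSome? (fun t => cols.find? (fun h => PySem.Str.isIn t (PySem.Str.lower h))) ts := by
  intro ts cols
  induction ts with
  | nil => rfl
  | cons t ts ih =>
    rw [List.findSome?_cons]
    unfold pvTokenScan
    cases cols.find? (fun h => PySem.Str.isIn t (PySem.Str.lower h)) with
    | some h => rfl
    | none => exact ih

-- B's loop when a favorite occurs: returns the first favorite regardless of the accumulator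
theorem bLoop_fav : ∀ (cols : List String) (b : Option (Nat × String)) (h₀ : String),
    cols.find? (fun h => pvFavorites.contains h) = some h₀ →
    pvBLoop cols b = some h₀ := by
  intro cols
  induction cols with
  | nil => intro b h₀ hfind; simp at hfind
  | cons h r ih =>
    intro b h₀ hfind
    unfold pvBLoop
    rw [favSet_contains]
    by_cases hf : pvFavorites.contains h
    · rw [List.find?_cons_of_pos hf] at hfind
      injection hfind with hh; subst hh
      rw [hf]
      rfl
    · have : pvFavorites.contains h = false := by
        cases hv : pvFavorites.contains h
        · rfl
        · exact absurd hv hf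
      rw [this]
      simp only [Bool.false_eq_true, if_false]
      rw [List.find?_cons_of_neg hf] at hfind
      exact ih _ h₀ hfind

-- B's loop when no favorite occurs: it is the argmin fold
theorem bLoop_nofav : ∀ (cols : List String) (b : Option (Nat × String)),
    cols.find? (fun h => pvFavorites.contains h) = none →
    pvBLoop cols b = (cols.foldl pvUpd b).map Prod.snd := by
  intro cols
  induction cols with
  | nil => intro b _; rfl
  | cons h r ih =>
    intro b hfind
    have hnf : pvFavorites.contains h = false := by
      have := List.find?_eq_none.mp hfind h (by simp)
      cases hv : pvFavorites.contains h
      · rfl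
      · exact absurd hv this
    unfold pvBLoop
    rw [favSet_contains, hnf]
    simp only [Bool.false_eq_true, if_false, List.foldl_cons]
    refine ih (pvUpd b h) ?_
    rw [List.find?_eq_none]
    intro x hx
    exact List.find?_eq_none.mp hfind x (by simp [hx])

-- ===== VERDICT (by name: the statement is the Claim_ definition above) =====
theorem candidate_id_column_spec : Claim_equal_candidate_id_column := by
  intro cols _
  unfold Spec_candidate_id_column candidate_id_column candidate_id_column_alt
  cases hfav : cols.find? (fun h => pvFavorites.contains h) with
  | some h₀ =>
    rw [bLoop_fav cols none h₀ hfav]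
  | none =>
    rw [bLoop_nofav cols none hfav, pvUpd_eq_gUpd]
    rw [← tokenScan_eq_argmin (fun t h => PySem.Str.isIn t (PySem.Str.lower h)) pvIdTokens cols]
    rw [tokenScan_eq_findSome]
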